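-- pv_equiv track=rewrite | github.com/brandonccccc/python-practice | Programmers/부족한 금액 계산하기.py | solution
-- ===== SOURCE A (Python) =====
-- def solution(price, money, count):
--     cnt = 0
--     for i in range(1, count+1):
--         cnt += i
--     if price*cnt - money < 0 :
--         return 0
--     else:
--         return price*cnt - money
-- ===== SOURCE B (Python) =====
-- def solution(price, money, count):
--     # Gauss closed form for 1+2+...+count (0 when count <= 0), floored at zero.
--     cnt = count * (count + 1) // 2 if count > 0 else 0
--     return max(0, price * cnt - money)
-- ===== Notes on version B (the rewrite author's own statement) =====
-- stated objective: faster
-- what changed: Replaces the O(count) accumulation loop for 1+2+...+count with the Gauss closed-form count*(count+1)//2 and the if/else clamp with max(0, ...).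
import Mathlib
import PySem

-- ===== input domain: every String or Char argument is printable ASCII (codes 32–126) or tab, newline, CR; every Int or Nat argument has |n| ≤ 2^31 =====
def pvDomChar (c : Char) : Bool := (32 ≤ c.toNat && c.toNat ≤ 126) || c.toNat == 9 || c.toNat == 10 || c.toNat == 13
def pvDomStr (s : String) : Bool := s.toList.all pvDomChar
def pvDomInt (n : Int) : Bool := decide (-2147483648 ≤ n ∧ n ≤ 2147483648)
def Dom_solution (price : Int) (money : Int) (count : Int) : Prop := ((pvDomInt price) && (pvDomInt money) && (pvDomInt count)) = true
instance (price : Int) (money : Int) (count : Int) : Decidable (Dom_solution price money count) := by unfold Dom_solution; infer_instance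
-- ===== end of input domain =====

-- B replaces A's O(count) summation loop with the Gauss closed form count*(count+1)//2 (faster, asymptotic).


-- ===== PORT A =====
def solution (price : Int) (money : Int) (count : Int) : Int :=
  let cnt := (PySem.List.pyRange 1 (count + 1) 1).foldl (fun acc i => acc + i) 0
  if price * cnt - money < 0 then 0 else price * cnt - money

-- ===== PORT B =====
def solution_alt (price : Int) (money : Int) (count : Int) : Int :=
  let cnt := if count > 0 then PySem.Int.floordiv (count * (count + 1)) 2 else 0
  max 0 (price * cnt - money)

-- ===== PRECONDITION & SPEC =====
def Spec_solution (price : Int) (money : Int) (count : Int) (out : Int) : Prop := out = solution_alt price money count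
instance (price : Int) (money : Int) (count : Int) (out : Int) : Decidable (Spec_solution price money count out) := by unfold Spec_solution; infer_instance

-- ===== CLAIM (what is proved, stated in full; the proofs are below) =====
def Claim_equal_solution : Prop := ∀ (price : Int) (money : Int) (count : Int), Dom_solution price money count → Spec_solution price money count (solution price money count)

-- ===== LEMMAS AND PROOFS =====

theorem pv_sum_two_mul (n : Nat) :
    2 * ((PySem.List.pyRange 1 ((n : Int) + 1) 1).foldl (fun acc i => acc + i) 0) = (n : Int) * ((n : Int) + 1) := by
  induction n with
  | zero => simp [PySem.List.pyRange_one_eq_nil]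
  | succ k ih =>
    have h : (((k : Nat) + 1 : Nat) : Int) + 1 = ((k : Int) + 1) + 1 := by push_cast; ring
    rw [h, PySem.List.pyRange_one_succ_right (by omega : (1:Int) ≤ (k : Int) + 1)]
    rw [List.foldl_append]
    simp only [List.foldl_cons, List.foldl_nil]
    push_cast
    nlinarith [ih]

theorem pv_cnt_eq (count : Int) :
    (PySem.List.pyRange 1 (count + 1) 1).foldl (fun acc i => acc + i) 0
      = (if count > 0 then PySem.Int.floordiv (count * (count + 1)) 2 else 0) := by
  by_cases hc : 0 < count
  · obtain ⟨n, hn⟩ : ∃ n : Nat, count = (n : Int) := ⟨count.toNat, by omega⟩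
    subst hn
    have h2 := pv_sum_two_mul n
    rw [if_pos hc]
    exact ((PySem.Int.floordiv_eq_iff_of_pos (by omega)).2
      ⟨by linarith, by linarith⟩).symm
  · rw [if_neg hc, PySem.List.pyRange_one_eq_nil (by omega)]
    rfl

-- ===== VERDICT (by name: the statement is the Claim_ definition above) =====
theorem solution_spec : Claim_equal_solution := by
  intro price money count _
  unfold Spec_solution solution solution_alt
  rw [pv_cnt_eq]
  dsimp only
  split_ifs <;> omega
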